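-- pv_equiv track=rewrite | github.com/EmileHbrt/Plm_comparaison | code/analyse/Comp_only_1_method_result.py | list_creator
-- ===== SOURCE A (Python) =====
-- def list_creator(str_arg: str):
--     """
--     Converts a string into a list of substrings, handling spaces and the character 'I'.
--
--     Args:
--     str_arg: The input string.
--     """
--     col_list = []
--     name = ''
--
--     for elm in str_arg:
--         if elm == ' ':
--             continue
--         if elm == "I":
--             col_list.append(name)
--             name = 'I'
--         else:
--             name += elm
--     col_list.append(name)
--
--     return col_list
-- ===== SOURCE B (Python) =====
-- def list_creator(str_arg: str):
--     s = str_arg.replace(' ', '')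
--     parts = s.split('I')
--     return [parts[0]] + ['I' + p for p in parts[1:]]
-- ===== Notes on version B (the rewrite author's own statement) =====
-- stated objective: simpler
-- what changed: Replaced the character-by-character accumulator loop with three whole-string library passes: strip all spaces with str.replace, cut at the separator character with str.split, and re-prepend that character to every segment after the first.
import Mathlib
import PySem

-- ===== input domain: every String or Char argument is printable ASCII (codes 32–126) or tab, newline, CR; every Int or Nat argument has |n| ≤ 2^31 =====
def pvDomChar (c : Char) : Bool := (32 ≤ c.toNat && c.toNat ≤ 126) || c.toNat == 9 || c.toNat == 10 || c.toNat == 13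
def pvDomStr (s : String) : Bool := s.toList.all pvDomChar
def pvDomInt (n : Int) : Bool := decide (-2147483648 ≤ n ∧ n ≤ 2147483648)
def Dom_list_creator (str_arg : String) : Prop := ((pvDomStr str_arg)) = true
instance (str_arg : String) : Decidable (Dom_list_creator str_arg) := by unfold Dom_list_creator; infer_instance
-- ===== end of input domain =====

-- B replaces A's character-by-character accumulator loop by whole-string passes
-- (remove spaces, split at 'I', re-prepend 'I' to later segments): simpler decomposition, same cost.

-- ===== PORT A =====
def list_creator (str_arg : String) : List String :=
  let st := str_arg.toList.foldl
    (fun (st : List String × String) elm =>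
      if elm = ' ' then st
      else if elm = 'I' then (st.1 ++ [st.2], "I")
      else (st.1, st.2.push elm))
    ([], "")
  st.1 ++ [st.2]

-- ===== PORT B =====
def list_creator_alt (str_arg : String) : List String :=
  let s := PySem.Str.replace str_arg " " ""
  match PySem.Str.split? s "I" with
  | some (p :: rest) => p :: rest.map (fun q => "I" ++ q)
  | _ => []   -- unreachable: split? with a nonempty separator returns some nonempty list

-- ===== PRECONDITION & SPEC =====
def Spec_list_creator (str_arg : String) (out : List String) : Prop := out = list_creator_alt str_arg
instance (str_arg : String) (out : List String) : Decidable (Spec_list_creator str_arg out) := by unfold Spec_list_creator; infer_instance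

-- ===== CLAIM (what is proved, stated in full; the proofs are below) =====
def Claim_equal_list_creator : Prop := ∀ (str_arg : String), Dom_list_creator str_arg → Spec_list_creator str_arg (list_creator str_arg)

-- ===== LEMMAS AND PROOFS =====

-- reference splitter: splAux cur l = remaining segments of l, with reversed prefix cur open
def splAux (cur : List Char) : List Char → List (List Char)
  | [] => [cur.reverse]
  | c :: t => if c = 'I' then cur.reverse :: splAux [] t else splAux (c :: cur) t

theorem splAux_ne_nil (cur : List Char) (l : List Char) : splAux cur l ≠ [] := by
  induction l generalizing cur with
  | nil => simp [splAux]
  | cons c t ih => by_cases h : c = 'I' <;> simp [splAux, h, ih]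

theorem splAux_cur (l : List Char) (cur : List Char) :
    splAux cur l = (cur.reverse ++ (splAux [] l).headI) :: (splAux [] l).tail := by
  induction l generalizing cur with
  | nil => simp [splAux]
  | cons c t ih =>
    by_cases h : c = 'I'
    · simp [splAux, h]
    · simp only [splAux, if_neg h]
      rw [ih (c :: cur), ih [c]]
      simp

theorem replace_go_spec (fuel : ℕ) (l acc : List Char) (h : l.length ≤ fuel) :
    PySem.Chars.replace.go [' '] [] fuel l acc
      = acc.reverse ++ l.filter (fun c => c != ' ') := by
  induction fuel generalizing l acc with
  | zero =>
    have : l = [] := List.length_eq_zero_iff.mp (Nat.le_zero.mp h)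
    subst this; simp [PySem.Chars.replace.go]
  | succ n ih =>
    cases l with
    | nil => simp [PySem.Chars.replace.go]
    | cons c t =>
      rw [PySem.Chars.replace.go]
      by_cases hc : c = ' '
      · subst hc
        simp only [List.isPrefixOf, BEq.rfl, Bool.true_and, if_true, List.length_cons,
          List.length_nil, List.drop_succ_cons, List.drop_zero, List.reverse_nil, List.nil_append]
        rw [ih t acc (by simpa using h)]
        simp
      · have hpre : [' '].isPrefixOf (c :: t) = false := by
          simp [List.isPrefixOf]
          exact fun hc' => absurd hc'.symm hc
        rw [hpre]
        simp only [Bool.false_eq_true, if_false]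
        rw [ih t (c :: acc) (by simpa using h)]
        simp [hc]

theorem replace_spaces (l : List Char) :
    PySem.Chars.replace l [' '] [] = l.filter (fun c => c != ' ') := by
  unfold PySem.Chars.replace
  simp only [List.isEmpty_cons, Bool.false_eq_true, if_false]
  rw [replace_go_spec l.length l [] le_rfl]
  simp

theorem splitOn_go_spec (fuel : ℕ) (l cur : List Char) (acc : List (List Char))
    (h : l.length ≤ fuel) :
    PySem.Chars.splitOn.go ['I'] fuel l cur acc = acc.reverse ++ splAux cur l := by
  induction fuel generalizing l cur acc with
  | zero =>
    have : l = [] := List.length_eq_zero_iff.mp (Nat.le_zero.mp h)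
    subst this; simp [PySem.Chars.splitOn.go, splAux]
  | succ n ih =>
    cases l with
    | nil => simp [PySem.Chars.splitOn.go, splAux]
    | cons c t =>
      rw [PySem.Chars.splitOn.go]
      by_cases hc : c = 'I'
      · subst hc
        simp only [List.isPrefixOf, BEq.rfl, Bool.true_and, if_true, List.length_cons,
          List.length_nil, List.drop_succ_cons, List.drop_zero]
        rw [ih t [] (cur.reverse :: acc) (by simpa using h)]
        simp [splAux]
      · have hpre : ['I'].isPrefixOf (c :: t) = false := by
          simp [List.isPrefixOf]
          exact fun hc' => absurd hc'.symm hc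
        rw [hpre]
        simp only [Bool.false_eq_true, if_false]
        rw [ih t (c :: cur) acc (by simpa using h)]
        simp [splAux, hc]

theorem splitOn_spec (l : List Char) :
    PySem.Chars.splitOn l ['I'] = splAux [] l := by
  unfold PySem.Chars.splitOn
  rw [splitOn_go_spec (l.length + 1) l [] [] (by omega)]
  simp

-- A's loop body as a named function (definitionally the lambda in the port)
def stepA (st : List String × String) (elm : Char) : List String × String :=
  if elm = ' ' then st
  else if elm = 'I' then (st.1 ++ [st.2], "I")
  else (st.1, st.2.push elm)

theorem list_creator_eq (s : String) :
    list_creator s = (s.toList.foldl stepA ([], "")).1 ++ [(s.toList.foldl stepA ([], "")).2] := rfl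

-- A's loop, characterised against the reference splitter on the space-filtered characters
theorem loopA_spec (l : List Char) (acc : List String) (name : String) :
    (l.foldl stepA (acc, name)).1 ++ [(l.foldl stepA (acc, name)).2]
    = acc ++ (name ++ String.ofList ((splAux [] (l.filter (fun c => c != ' '))).headI))
        :: ((splAux [] (l.filter (fun c => c != ' '))).tail).map
            (fun q => String.ofList ('I' :: q)) := by
  induction l generalizing acc name with
  | nil => simp [splAux]
  | cons c t ih =>
    by_cases hsp : c = ' '
    · subst hsp
      rw [show (' ' :: t).foldl stepA (acc, name) = t.foldl stepA (acc, name) by simp [stepA]]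
      rw [ih acc name]
      simp
    · by_cases hI : c = 'I'
      · subst hI
        rw [show ('I' :: t).foldl stepA (acc, name) = t.foldl stepA (acc ++ [name], "I") by
          simp [stepA]]
        rw [ih (acc ++ [name]) "I"]
        have hfil : ('I' :: t).filter (fun c => c != ' ') =
            'I' :: t.filter (fun c => c != ' ') := by simp
        rw [hfil]
        have hI2 : splAux [] ('I' :: t.filter (fun c => c != ' '))
            = [] :: splAux [] (t.filter (fun c => c != ' ')) := by simp [splAux]
        rw [hI2]
        cases hsp2 : splAux [] (t.filter (fun c => c != ' ')) with
        | nil => exact absurd hsp2 (splAux_ne_nil [] _)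
        | cons p rest =>
          simp only [List.map_cons, List.append_assoc, List.cons_append, List.nil_append,
            List.headI_cons, List.tail_cons]
          have e1 : name ++ String.ofList [] = name := by
            apply String.ext
            simp [String.toList_append]
          have e2 : ("I" : String) ++ String.ofList p = String.ofList ('I' :: p) := by
            apply String.ext
            simp [String.toList_append, String.toList_ofList]
          rw [e1, ← e2]
      · rw [show (c :: t).foldl stepA (acc, name) = t.foldl stepA (acc, name.push c) by
          simp [stepA, hsp, hI]]
        rw [ih acc (name.push c)]
        have hfil : (c :: t).filter (fun c => c != ' ') =
            c :: t.filter (fun c => c != ' ') := by simp [hsp]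
        rw [hfil]
        have hc2 : splAux [] (c :: t.filter (fun c => c != ' '))
            = splAux [c] (t.filter (fun c => c != ' ')) := by simp [splAux, hI]
        rw [hc2, splAux_cur _ [c]]
        simp only [List.reverse_cons, List.reverse_nil, List.nil_append, List.headI_cons,
          List.tail_cons, List.singleton_append]
        congr 2
        apply String.ext
        simp [String.toList_append, String.toList_ofList, String.toList_push]

-- ===== VERDICT (by name: the statement is the Claim_ definition above) =====
theorem list_creator_spec : Claim_equal_list_creator := by
  intro s _
  unfold Spec_list_creator list_creator_alt
  rw [list_creator_eq]
  have htl : (PySem.Str.replace s " " "").toList = s.toList.filter (fun c => c != ' ') := by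
    rw [PySem.Str.toList_replace]
    simpa using replace_spaces s.toList
  have hsplit : PySem.Str.split? (PySem.Str.replace s " " "") "I"
      = some ((splAux [] (s.toList.filter (fun c => c != ' '))).map String.ofList) := by
    unfold PySem.Str.split? PySem.Chars.split?
    rw [htl]
    simp [splitOn_spec]
  rw [loopA_spec s.toList [] ""]
  show _ = match PySem.Str.split? (PySem.Str.replace s " " "") "I" with
    | some (p :: rest) => p :: List.map (fun q => "I" ++ q) rest
    | _ => []
  rw [hsplit]
  cases hsp2 : splAux [] (s.toList.filter (fun c => c != ' ')) with
  | nil => exact absurd hsp2 (splAux_ne_nil [] _)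
  | cons p rest =>
    simp only [List.map_cons, List.nil_append, List.headI_cons, List.tail_cons]
    have e1 : ("" : String) ++ String.ofList p = String.ofList p := by
      apply String.ext
      simp
    rw [e1, List.map_map]
    congr 1
    apply List.map_congr_left
    intro q _
    apply String.ext
    simp
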